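-- pv_equiv track=rewrite | github.com/yakoodev/DigitalDealsStats | app/services/platimarket_client.py | _split_prefixed_response
-- ===== SOURCE A (Python) =====
-- def _split_prefixed_response(payload: str, parts: int) -> tuple[list[str], str]:
--     data = payload or ""
--     parsed: list[str] = []
--     start = 0
--     for _ in range(parts):
--         sep = data.find("|", start)
--         if sep < 0:
--             return [], data
--         parsed.append(data[start:sep])
--         start = sep + 1
--     return parsed, data[start:]
-- ===== SOURCE B (Python) =====
-- def _split_prefixed_response(payload: str, parts: int) -> tuple[list[str], str]:
--     data = payload or ""
--     if parts <= 0: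
--         return [], data
--     result = data.split("|", parts)
--     if len(result) <= parts:
--         return [], data
--     return result[:parts], result[parts]
-- ===== Notes on version B (the rewrite author's own statement) =====
-- stated objective: idiomatic
-- what changed: The hand-written find-loop with index bookkeeping is replaced by one str.split('|', parts) call plus slicing, with a length check detecting too few separators.
import Mathlib
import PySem

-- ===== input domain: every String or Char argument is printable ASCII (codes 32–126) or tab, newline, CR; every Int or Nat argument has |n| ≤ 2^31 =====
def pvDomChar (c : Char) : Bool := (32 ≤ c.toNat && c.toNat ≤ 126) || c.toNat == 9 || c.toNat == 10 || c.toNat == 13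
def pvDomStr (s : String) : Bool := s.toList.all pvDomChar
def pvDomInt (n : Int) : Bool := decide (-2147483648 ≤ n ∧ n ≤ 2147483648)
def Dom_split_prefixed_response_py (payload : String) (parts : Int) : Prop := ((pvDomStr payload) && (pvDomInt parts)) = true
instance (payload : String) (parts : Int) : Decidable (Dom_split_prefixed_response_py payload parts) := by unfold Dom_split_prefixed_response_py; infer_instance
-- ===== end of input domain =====

-- B replaces A's hand-written find-loop (index bookkeeping over repeated str.find) by one split('|', parts) call plus slicing (idiomatic); return values proved equal on all inputs.

-- ===== PORT A =====
-- the 'for _ in range(parts)' loop of A: state is (start, parsed); runs parts.toNat times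
def pvALoop (data : List Char) : Nat → Nat → List String → List String × String
  | 0, start, parsed => (parsed, String.ofList (PySem.Chars.slice data (some (start : Int)) none))
  | n + 1, start, parsed =>
    let sep := PySem.Chars.findFrom data ['|'] (start : Int) none
    if sep < 0 then ([], String.ofList data)
    else pvALoop data n (sep.toNat + 1)
      (parsed ++ [String.ofList (PySem.Chars.slice data (some (start : Int)) (some sep))])

def split_prefixed_response_py (payload : String) (parts : Int) : List String × String :=
  let data := if payload = "" then "" else payload   -- payload or ""
  pvALoop data.toList parts.toNat 0 []

-- ===== PORT B =====
def split_prefixed_response_py_alt (payload : String) (parts : Int) : List String × String :=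
  let data := if payload = "" then "" else payload   -- payload or ""
  if parts ≤ 0 then ([], data)
  else
    -- data.split("|", parts); the separator is nonempty, so splitMax? = some splitOnMax
    let result := PySem.Chars.splitOnMax data.toList ['|'] parts
    if (result.length : Int) ≤ parts then ([], data)
    -- result[parts]: the index is in range here (parts < len(result)), so getD is exact
    else ((result.take parts.toNat).map String.ofList, String.ofList (result.getD parts.toNat []))

-- ===== PRECONDITION & SPEC =====
def Spec_split_prefixed_response_py (payload : String) (parts : Int) (out : List String × String) : Prop := out = split_prefixed_response_py_alt payload parts
instance (payload : String) (parts : Int) (out : List String × String) : Decidable (Spec_split_prefixed_response_py payload parts out) := by unfold Spec_split_prefixed_response_py; infer_instance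

-- ===== CLAIM (what is proved, stated in full; the proofs are below) =====
def Claim_equal_split_prefixed_response_py : Prop := ∀ (payload : String) (parts : Int), Dom_split_prefixed_response_py payload parts → Spec_split_prefixed_response_py payload parts (split_prefixed_response_py payload parts)

-- ===== LEMMAS AND PROOFS =====

-- first index of '|' in s, as an Option, via PySem find
def pvIdx? (s : List Char) : Option Nat :=
  if PySem.Chars.find s ['|'] < 0 then none else some (PySem.Chars.find s ['|']).toNat

lemma pvFind_eq (s sub : List Char) (k : Nat) (h1 : sub <+: s.drop k)
    (h2 : ∀ i < k, ¬ sub <+: s.drop i) : PySem.Chars.find s sub = k := by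
  have hinf : sub <:+: s := h1.isInfix.trans (List.drop_suffix k s).isInfix
  have h0 : 0 ≤ PySem.Chars.find s sub := (PySem.Chars.find_nonneg_iff s sub).2 hinf
  obtain ⟨hp, hmin⟩ := PySem.Chars.find_spec h0
  set m := (PySem.Chars.find s sub).toNat with hm
  have : m = k := by
    rcases lt_trichotomy m k with h | h | h
    · exact absurd hp (h2 m h)
    · exact h
    · exact absurd h1 (hmin k h)
  omega

lemma pvIdx?_nil : pvIdx? [] = none := by
  have : PySem.Chars.find [] ['|'] = -1 :=
    (PySem.Chars.find_eq_neg_one_iff _ _).2 (by simp)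
  simp [pvIdx?, this]

lemma pvIdx?_cons_bar (rest : List Char) : pvIdx? ('|' :: rest) = some 0 := by
  have h := pvFind_eq ('|' :: rest) ['|'] 0 (by simp) (by omega)
  simp [pvIdx?, h]

lemma pvIdx?_cons_ne (c : Char) (rest : List Char) (h : c ≠ '|') :
    pvIdx? (c :: rest) = (pvIdx? rest).map (· + 1) := by
  unfold pvIdx?
  by_cases hr : PySem.Chars.find rest ['|'] < 0
  · have hr1 : PySem.Chars.find rest ['|'] = -1 := by
      have := PySem.Chars.neg_one_le_find rest ['|']; omega
    have hni : ¬ ['|'] <:+: rest := (PySem.Chars.find_eq_neg_one_iff _ _).1 hr1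
    have : PySem.Chars.find (c :: rest) ['|'] = -1 := by
      refine (PySem.Chars.find_eq_neg_one_iff _ _).2 ?_
      intro hin
      rcases (List.singleton_infix_iff _ _).1 hin with h1
      rcases List.mem_cons.1 h1 with h2 | h2
      · exact h h2.symm
      · exact hni ((List.singleton_infix_iff _ _).2 h2)
    simp [this, hr]
  · push Not at hr
    obtain ⟨hp, hmin⟩ := PySem.Chars.find_spec hr
    set k := (PySem.Chars.find rest ['|']).toNat with hk
    have hfind : PySem.Chars.find (c :: rest) ['|'] = (k + 1 : Nat) := by
      apply pvFind_eq
      · simpa using hp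
      · intro i hi
        match i with
        | 0 =>
          simp only [List.drop_zero]
          intro hpc
          obtain ⟨t, ht⟩ := hpc
          exact h (show c = '|' by simpa using (congrArg (·.head?) ht).symm)
        | j + 1 =>
          have := hmin j (by omega)
          simpa using this
    have h2 : ¬ PySem.Chars.find rest ['|'] < 0 := by omega
    have h1 : ¬ ((k:Int) + 1) < 0 := by omega
    simp [hfind, h1, h2]

lemma pvIdx?_lt (s : List Char) (k : Nat) (h : pvIdx? s = some k) : k < s.length := by
  unfold pvIdx? at h
  split at h
  · exact absurd h (by simp)
  · rename_i h0
    push Not at h0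
    obtain ⟨hp, _⟩ := PySem.Chars.find_spec h0
    have hk : k = (PySem.Chars.find s ['|']).toNat := by
      simpa using (Option.some.inj h).symm
    subst hk
    by_contra hge
    push Not at hge
    rw [List.drop_eq_nil_of_le hge] at hp
    simpa using hp.length_le

-- pieces produced by splitting at the first n separators (always nonempty)

def pvF : Nat → List Char → List (List Char)
  | 0, s => [s]
  | n + 1, s =>
    match pvIdx? s with
    | none => [s]
    | some k => s.take k :: pvF n (s.drop (k + 1))

-- A's loop result on a suffix: none means 'sep < 0 was hit' (too few separators)

def pvAF : Nat → List Char → Option (List (List Char) × List Char)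
  | 0, s => some ([], s)
  | n + 1, s =>
    match pvIdx? s with
    | none => none
    | some k => (pvAF n (s.drop (k + 1))).map (fun pr => (s.take k :: pr.1, pr.2))

def pvConsHead (pre : List Char) : List (List Char) → List (List Char)
  | [] => [pre]
  | h :: t => (pre ++ h) :: t

lemma pvF_nil (m : Nat) : pvF m [] = [[]] := by
  cases m with
  | zero => rfl
  | succ n => simp [pvF, pvIdx?_nil]

lemma pvF_ne_nil (m : Nat) (s : List Char) : pvF m s ≠ [] := by
  cases m with
  | zero => simp [pvF]
  | succ n => simp only [pvF]; split <;> simp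

-- characterization of splitOnMax.go for separator "|"

lemma pvGo_char : ∀ (fuel m : Nat) (l cur : List Char) (acc : List (List Char)),
    l.length ≤ fuel →
    PySem.Chars.splitOnMax.go ['|'] fuel m l cur acc =
      acc.reverse ++ pvConsHead cur.reverse (pvF m l) := by
  intro fuel
  induction fuel with
  | zero =>
    intro m l cur acc hl
    have : l = [] := by simpa using List.eq_nil_of_length_eq_zero (by omega)
    subst this
    simp [PySem.Chars.splitOnMax.go, pvF_nil, pvConsHead]
  | succ f ih =>
    intro m l cur acc hl
    cases l with
    | nil => simp [PySem.Chars.splitOnMax.go, pvF_nil, pvConsHead]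
    | cons c rest =>
      cases m with
      | zero => simp [PySem.Chars.splitOnMax.go, pvF, pvConsHead]
      | succ m' =>
        by_cases hc : c = '|'
        · subst hc
          have hpre : List.isPrefixOf ['|'] ('|' :: rest) = true := by simp [List.isPrefixOf]
          rw [show PySem.Chars.splitOnMax.go ['|'] (f + 1) (m' + 1) ('|' :: rest) cur acc =
              PySem.Chars.splitOnMax.go ['|'] f m' rest [] (cur.reverse :: acc) by
            simp [PySem.Chars.splitOnMax.go, hpre]]
          rw [ih m' rest [] (cur.reverse :: acc) (by simpa using Nat.lt_succ_iff.mp (by simpa using hl))]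
          simp only [pvF, pvIdx?_cons_bar]
          cases hF : pvF m' rest with
          | nil => exact absurd hF (pvF_ne_nil m' rest)
          | cons h t => simp [pvConsHead, hF]
        · have hpre : List.isPrefixOf ['|'] (c :: rest) = false := by
            simp [List.isPrefixOf]; exact fun h => absurd h.symm hc
          rw [show PySem.Chars.splitOnMax.go ['|'] (f + 1) (m' + 1) (c :: rest) cur acc =
              PySem.Chars.splitOnMax.go ['|'] f (m' + 1) rest (c :: cur) acc by
            simp [PySem.Chars.splitOnMax.go, hpre]]
          rw [ih (m' + 1) rest (c :: cur) acc (by simpa using Nat.lt_succ_iff.mp (by simpa using hl))]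
          simp only [pvF, pvIdx?_cons_ne c rest hc]
          cases hI : pvIdx? rest with
          | none => simp [pvConsHead]
          | some k => simp [pvConsHead, List.take_succ_cons, List.drop_succ_cons]

lemma pvSplitOnMax_eq_pvF (l : List Char) (p : Int) (hp : 0 < p) :
    PySem.Chars.splitOnMax l ['|'] p = pvF p.toNat l := by
  have hnp : ¬ p < 0 := by omega
  rw [PySem.Chars.splitOnMax, if_neg hnp,
    pvGo_char (l.length + 1) p.toNat l [] [] (by omega)]
  cases hF : pvF p.toNat l with
  | nil => exact absurd hF (pvF_ne_nil _ _)
  | cons h t => simp [pvConsHead]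

lemma pvAF_F : ∀ (n : Nat) (s : List Char),
    (pvAF n s = none → (pvF n s).length ≤ n) ∧
    (∀ ps r, pvAF n s = some (ps, r) → pvF n s = ps ++ [r] ∧ ps.length = n) := by
  intro n
  induction n with
  | zero =>
    intro s
    constructor
    · intro h; simp [pvAF] at h
    · intro ps r h
      simp only [pvAF, Option.some.injEq, Prod.mk.injEq] at h
      simp [pvF, ← h.1, ← h.2]
  | succ n ih =>
    intro s
    cases hI : pvIdx? s with
    | none =>
      constructor
      · intro _; simp [pvF, hI]
      · intro ps r h; simp [pvAF, hI] at h
    | some k =>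
      constructor
      · intro h
        simp only [pvAF, hI, Option.map_eq_none_iff] at h
        have := (ih (s.drop (k + 1))).1 h
        simp only [pvF, hI, List.length_cons]
        omega
      · intro ps r h
        simp only [pvAF, hI, Option.map_eq_some_iff] at h
        obtain ⟨⟨ps', r'⟩, hrec, heq⟩ := h
        obtain ⟨h1, h2⟩ := (ih (s.drop (k + 1))).2 ps' r' hrec
        simp only [Prod.mk.injEq] at heq
        simp [pvF, hI, h1, ← heq.1, ← heq.2, h2]

lemma pvIdx?_find (s : List Char) : pvIdx? s = none ↔ PySem.Chars.find s ['|'] = -1 := by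
  have := PySem.Chars.neg_one_le_find s ['|']
  unfold pvIdx?; split <;> simp <;> omega

-- A's loop computes pvAF on the suffix data[start:]

lemma pvALoop_char : ∀ (n : Nat) (data : List Char) (start : Nat) (parsed : List String),
    start ≤ data.length →
    pvALoop data n start parsed =
      (match pvAF n (data.drop start) with
      | none => ([], String.ofList data)
      | some (ps, r) => (parsed ++ ps.map String.ofList, String.ofList r)) := by
  intro n
  induction n with
  | zero =>
    intro data start parsed h
    simp [pvALoop, pvAF, PySem.Chars.slice_eq_listSlice, PySem.List.slice_from_natCast]
  | succ n ih =>
    intro data start parsed hstart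
    rw [show pvALoop data (n+1) start parsed =
      (let sep := PySem.Chars.findFrom data ['|'] (start : Int) none
       if sep < 0 then ([], String.ofList data)
       else pvALoop data n (sep.toNat + 1)
         (parsed ++ [String.ofList (PySem.Chars.slice data (some (start : Int)) (some sep))])) from rfl]
    rw [PySem.Chars.findFrom_natCast data ['|'] start hstart]
    cases hI : pvIdx? (data.drop start) with
    | none =>
      have hf : PySem.Chars.find (data.drop start) ['|'] = -1 := (pvIdx?_find _).1 hI
      simp [hf, pvAF, hI]
    | some k =>
      have hfpos : ¬ PySem.Chars.find (data.drop start) ['|'] = -1 := by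
        intro hf; rw [(pvIdx?_find _).2 hf] at hI; exact absurd hI (by simp)
      have hge : 0 ≤ PySem.Chars.find (data.drop start) ['|'] := by
        have := PySem.Chars.neg_one_le_find (data.drop start) ['|']; omega
      have hk : PySem.Chars.find (data.drop start) ['|'] = (k : Int) := by
        unfold pvIdx? at hI
        rw [if_neg (by omega)] at hI
        have := Option.some.inj hI
        omega
      have hklt : k < (data.drop start).length := pvIdx?_lt _ k hI
      rw [if_neg hfpos]
      rw [if_neg (by rw [hk]; omega)]
      have harg : ((start : Int) + PySem.Chars.find (data.drop start) ['|']).toNat + 1 = start + k + 1 := by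
        rw [hk]; omega
      rw [harg]
      rw [ih data (start + k + 1) _ (by simp at hklt; omega)]
      have hdrop : data.drop (start + k + 1) = (data.drop start).drop (k + 1) := by
        rw [List.drop_drop]; ring_nf
      have hslice : PySem.Chars.slice data (some (start : Int)) (some ((start : Int) + PySem.Chars.find (data.drop start) ['|'])) = (data.drop start).take k := by
        rw [hk, show (start : Int) + (k : Int) = ((start + k : Nat) : Int) by push_cast; ring,
          PySem.Chars.slice_eq_listSlice, PySem.List.slice_natCast]
        congr 1
        omega
      rw [hdrop, hslice]
      simp only [pvAF, hI]
      cases hrec : pvAF n ((data.drop start).drop (k + 1)) with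
      | none => simp
      | some pr =>
        obtain ⟨ps, r⟩ := pr
        simp

theorem pvEq (payload : String) (parts : Int) :
    split_prefixed_response_py payload parts = split_prefixed_response_py_alt payload parts := by
  unfold split_prefixed_response_py split_prefixed_response_py_alt
  set data := if payload = "" then "" else payload with hdata
  rw [pvALoop_char parts.toNat data.toList 0 [] (by omega)]
  rw [List.drop_zero]
  by_cases hp : parts ≤ 0
  · have h0 : parts.toNat = 0 := by omega
    simp [hp, h0, pvAF]
  · push Not at hp
    rw [if_neg (by omega)]
    rw [pvSplitOnMax_eq_pvF data.toList parts hp]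
    have htn : ((parts.toNat : Nat) : Int) = parts := by omega
    cases hA : pvAF parts.toNat data.toList with
    | none =>
      have hlen := (pvAF_F parts.toNat data.toList).1 hA
      rw [if_pos (by omega)]
      simp [String.ofList_toList]
    | some pr =>
      obtain ⟨ps, r⟩ := pr
      obtain ⟨hF, hlen⟩ := (pvAF_F parts.toNat data.toList).2 ps r hA
      rw [hF]
      rw [if_neg (by simp; omega)]
      rw [List.take_append_of_le_length (le_of_eq hlen.symm),
        List.take_of_length_le (le_of_eq hlen),
        List.getD_append_right ps [r] [] parts.toNat (le_of_eq hlen)]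
      simp [hlen]

-- ===== VERDICT (by name: the statement is the Claim_ definition above) =====
theorem split_prefixed_response_py_spec : Claim_equal_split_prefixed_response_py := by
  intro payload parts _
  exact pvEq payload parts
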